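-- pv_equiv track=rewrite | github.com/maximo770/pymatria | pymatria.py | reduce_number_to_hebrew_word
-- ===== SOURCE A (Python) =====
-- GEMATRIA_CHART = {
-- "א": 1,
-- "ב": 2,
-- "ג": 3,
-- "ד": 4,
-- "ה": 5,
-- "ו": 6,
-- "ז": 7,
-- "ח": 8,
-- "ט": 9,
-- "י": 10,
-- "כ": 20,
-- "ל": 30,
-- "מ": 40,
-- "נ": 50,
-- "ס": 60,
-- "ע": 70,
-- "פ": 80,
-- "צ": 90,
-- "ק": 100,
-- "ר": 200,
-- "ש": 300,
-- "ת": 400,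
-- "ך": 500,
-- "ם": 600,
-- "ן": 700,
-- "ף": 800,
-- "ץ": 900,
-- }
--
-- def reduce_number_to_hebrew_word(number):
--     """Converts a given number to its corresponding Hebrew word using gematria."""
--     # Initialize an empty string to store the Hebrew word
--     hebrew_word = ""
--
--     # Check if the input number is valid
--     if number < 1 or number > 7000:
--         raise ValueError("The input number must be between 1 and 7000.")
--
--     # Iterate while the number is greater than zero
--     while number > 0:
--         # Find the largest gematria value that is less than or equal to the remaining number
--         largest_gematria_value = 0
--         for value in GEMATRIA_CHART.values():
--             if value <= number and value > largest_gematria_value: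
--                 largest_gematria_value = value
--
--         # Find the corresponding Hebrew letter for the largest gematria value
--         hebrew_letter = ""
--         for letter, value in GEMATRIA_CHART.items():
--             if value == largest_gematria_value:
--                 hebrew_letter = letter
--                 break
--
--         # Append the Hebrew letter to the word
--         hebrew_word += hebrew_letter
--
--         # Subtract the largest gematria value from the remaining number
--         number -= largest_gematria_value
--
--     # Return the Hebrew word
--     return hebrew_word
-- ===== SOURCE B (Python) =====
-- GEMATRIA_CHART = {
-- "א": 1, "ב": 2, "ג": 3, "ד": 4, "ה": 5, "ו": 6, "ז": 7, "ח": 8, "ט": 9,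
-- "י": 10, "כ": 20, "ל": 30, "מ": 40, "נ": 50, "ס": 60, "ע": 70, "פ": 80, "צ": 90,
-- "ק": 100, "ר": 200, "ש": 300, "ת": 400, "ך": 500, "ם": 600, "ן": 700, "ף": 800, "ץ": 900,
-- }
--
-- _PAIRS_DESC = sorted(GEMATRIA_CHART.items(), key=lambda kv: -kv[1])
--
-- def reduce_number_to_hebrew_word(number):
--     """Converts a given number to its corresponding Hebrew word using gematria."""
--     if number < 1 or number > 7000:
--         raise ValueError("The input number must be between 1 and 7000.")
--     parts = []
--     for letter, value in _PAIRS_DESC: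
--         while number >= value:
--             parts.append(letter)
--             number -= value
--     return "".join(parts)
-- ===== Notes on version B (the rewrite author's own statement) =====
-- stated objective: simpler
-- what changed: Replaced A's per-iteration max-scan over the chart plus a second lookup scan for the letter with a single greedy sweep over a list of (letter, value) pairs sorted once by value descending, accumulating parts joined at the end.
import Mathlib
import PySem

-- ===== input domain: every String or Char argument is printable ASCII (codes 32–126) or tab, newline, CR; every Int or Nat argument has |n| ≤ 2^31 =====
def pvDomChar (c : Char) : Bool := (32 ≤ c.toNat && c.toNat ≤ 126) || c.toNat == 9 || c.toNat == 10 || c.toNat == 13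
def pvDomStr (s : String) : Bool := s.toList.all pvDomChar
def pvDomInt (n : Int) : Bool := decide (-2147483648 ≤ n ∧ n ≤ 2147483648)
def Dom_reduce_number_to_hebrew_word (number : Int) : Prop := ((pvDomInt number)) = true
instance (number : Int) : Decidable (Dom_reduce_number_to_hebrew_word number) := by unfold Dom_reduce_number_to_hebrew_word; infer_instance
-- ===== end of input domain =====

-- B replaces A's per-step max-scan over the chart plus a second letter-lookup scan by a
-- single greedy sweep over the chart sorted once by value descending (objective: simpler).

-- ===== PORT A =====
-- GEMATRIA_CHART as an insertion-ordered association list (letter, value)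
def gematriaChart : List (String × Int) :=
  [("א",1),("ב",2),("ג",3),("ד",4),("ה",5),("ו",6),("ז",7),("ח",8),("ט",9),("י",10),("כ",20),("ל",30),("מ",40),("נ",50),("ס",60),("ע",70),("פ",80),("צ",90),("ק",100),("ר",200),("ש",300),("ת",400),("ך",500),("ם",600),("ן",700),("ף",800),("ץ",900)]

-- A's first inner for-loop: largest chart value ≤ number
def pvLargestValue (number : Int) : Int :=
  gematriaChart.foldl (fun best p => if p.2 ≤ number ∧ best < p.2 then p.2 else best) 0

-- A's second inner for-loop: first letter whose value equals v ("" if none)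
def pvLetterFor (v : Int) : String :=
  match gematriaChart.find? (fun p => p.2 == v) with
  | some p => p.1
  | none => ""

-- A's while-loop; fuel = number.toNat suffices since each step subtracts a value ≥ 1
def pvALoop : Nat → Int → String → String
  | 0, _, acc => acc
  | fuel + 1, n, acc =>
      if n > 0 then
        let v := pvLargestValue n
        pvALoop fuel (n - v) (acc ++ pvLetterFor v)
      else acc

def reduce_number_to_hebrew_word (number : Int) : String :=
  if number < 1 ∨ number > 7000 then ""   -- Python raises ValueError here; excluded by Pre_
  else pvALoop number.toNat number ""

-- ===== PORT B =====
-- sorted(GEMATRIA_CHART.items(), key=lambda kv: -kv[1])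
def pvPairsDesc : List (String × Int) :=
  PySem.List.sorted gematriaChart (fun kv => -kv.2) false

-- the inner 'while number >= value'; fuel = n.toNat suffices since every value ≥ 1
def pvBWhile : Nat → Int → Int → String → List String → Int × List String
  | 0, n, _, _, parts => (n, parts)
  | fuel + 1, n, v, l, parts =>
      if n ≥ v then pvBWhile fuel (n - v) v l (parts ++ [l]) else (n, parts)

-- the outer 'for letter, value in _PAIRS_DESC'
def pvBSweep : List (String × Int) → Int → List String → List String
  | [], _, parts => parts
  | (l, v) :: rest, n, parts =>
      let r := pvBWhile n.toNat n v l parts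
      pvBSweep rest r.1 r.2

def reduce_number_to_hebrew_word_alt (number : Int) : String :=
  if number < 1 ∨ number > 7000 then ""   -- Python raises ValueError here; excluded by Pre_
  else PySem.Str.join "" (pvBSweep pvPairsDesc number [])

-- ===== PRECONDITION & SPEC =====
-- Pre_: exactly the inputs on which the Python returns (elsewhere it raises ValueError)
def Pre_reduce_number_to_hebrew_word (number : Int) : Prop := 1 ≤ number ∧ number ≤ 7000
instance (number : Int) : Decidable (Pre_reduce_number_to_hebrew_word number) := by
  unfold Pre_reduce_number_to_hebrew_word; infer_instance
def pvWitness_reduce_number_to_hebrew_word : Int := 345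

def Spec_reduce_number_to_hebrew_word (number : Int) (out : String) : Prop := out = reduce_number_to_hebrew_word_alt number
instance (number : Int) (out : String) : Decidable (Spec_reduce_number_to_hebrew_word number out) := by unfold Spec_reduce_number_to_hebrew_word; infer_instance

-- ===== CLAIM (what is proved, stated in full; the proofs are below) =====
def Claim_equal_reduce_number_to_hebrew_word : Prop := ∀ (number : Int), Dom_reduce_number_to_hebrew_word number → Pre_reduce_number_to_hebrew_word number → Spec_reduce_number_to_hebrew_word number (reduce_number_to_hebrew_word number)

-- ===== LEMMAS AND PROOFS =====

-- the sorted chart, spelled out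
theorem pv_pairs_eq : pvPairsDesc = [("ץ",900),("ף",800),("ן",700),("ם",600),("ך",500),("ת",400),("ש",300),("ר",200),("ק",100),("צ",90),("פ",80),("ע",70),("ס",60),("נ",50),("מ",40),("ל",30),("כ",20),("י",10),("ט",9),("ח",8),("ז",7),("ו",6),("ה",5),("ד",4),("ג",3),("ב",2),("א",1)] := by decide

-- A's max-scan never decreases its accumulator
theorem pv_foldl_best_le (n : Int) (l : List (String × Int)) (b : Int) :
    b ≤ l.foldl (fun best p => if p.2 ≤ n ∧ best < p.2 then p.2 else best) b := by
  induction l generalizing b with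
  | nil => simp
  | cons p rest ih =>
    simp only [List.foldl_cons]
    refine le_trans ?_ (ih _)
    dsimp only
    split
    · next h => omega
    · exact le_refl b

-- one scan step never drops below a chart value it admits
theorem pv_foldl_step_le (n b : Int) (p : String × Int) (hn : p.2 ≤ n) :
    p.2 ≤ (if p.2 ≤ n ∧ b < p.2 then p.2 else b) := by
  split <;> omega

-- the scan's result dominates every admitted chart value
theorem pv_foldl_best_ge_mem (n : Int) (l : List (String × Int)) :
    ∀ (b : Int) (p : String × Int), p ∈ l → p.2 ≤ n →
      p.2 ≤ l.foldl (fun best q => if q.2 ≤ n ∧ best < q.2 then q.2 else best) b := by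
  induction l with
  | nil => simp
  | cons q rest ih =>
    intro b p hp hn
    simp only [List.foldl_cons]
    rcases List.mem_cons.mp hp with hpq | hpr
    · subst hpq
      exact le_trans (pv_foldl_step_le n b p hn) (pv_foldl_best_le n rest _)
    · exact ih _ p hpr hn

-- the greedy pick is ≥ 1 on positive input (value 1 is in the chart)
theorem pv_largest_pos (n : Int) (h : 1 ≤ n) : 1 ≤ pvLargestValue n := by
  have hmem : ("א", (1:Int)) ∈ gematriaChart := by simp [gematriaChart]
  exact pv_foldl_best_ge_mem n gematriaChart 0 ("א", 1) hmem h

-- for n ≥ 900 the greedy pick is 900 (the chart maximum)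
theorem pv_largest_900 (n : Int) (h : 900 ≤ n) : pvLargestValue n = 900 := by
  have h1 : ((1:Int) ≤ n) = True := by simp; omega
  have h2 : ((2:Int) ≤ n) = True := by simp; omega
  have h3 : ((3:Int) ≤ n) = True := by simp; omega
  have h4 : ((4:Int) ≤ n) = True := by simp; omega
  have h5 : ((5:Int) ≤ n) = True := by simp; omega
  have h6 : ((6:Int) ≤ n) = True := by simp; omega
  have h7 : ((7:Int) ≤ n) = True := by simp; omega
  have h8 : ((8:Int) ≤ n) = True := by simp; omega
  have h9 : ((9:Int) ≤ n) = True := by simp; omega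
  have h10 : ((10:Int) ≤ n) = True := by simp; omega
  have h20 : ((20:Int) ≤ n) = True := by simp; omega
  have h30 : ((30:Int) ≤ n) = True := by simp; omega
  have h40 : ((40:Int) ≤ n) = True := by simp; omega
  have h50 : ((50:Int) ≤ n) = True := by simp; omega
  have h60 : ((60:Int) ≤ n) = True := by simp; omega
  have h70 : ((70:Int) ≤ n) = True := by simp; omega
  have h80 : ((80:Int) ≤ n) = True := by simp; omega
  have h90 : ((90:Int) ≤ n) = True := by simp; omega
  have h100 : ((100:Int) ≤ n) = True := by simp; omega
  have h200 : ((200:Int) ≤ n) = True := by simp; omega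
  have h300 : ((300:Int) ≤ n) = True := by simp; omega
  have h400 : ((400:Int) ≤ n) = True := by simp; omega
  have h500 : ((500:Int) ≤ n) = True := by simp; omega
  have h600 : ((600:Int) ≤ n) = True := by simp; omega
  have h700 : ((700:Int) ≤ n) = True := by simp; omega
  have h800 : ((800:Int) ≤ n) = True := by simp; omega
  have h900 : ((900:Int) ≤ n) = True := by simp; omega
  simp [pvLargestValue, gematriaChart, h1, h2, h3, h4, h5, h6, h7, h8, h9, h10, h20, h30, h40, h50, h60, h70, h80, h90, h100, h200, h300, h400, h500, h600, h700, h800, h900]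

theorem pv_letter_900 : pvLetterFor 900 = "ץ" := by decide

-- accumulator comes out of A's loop
theorem pv_aLoop_acc (f : Nat) : ∀ (n : Int) (acc : String), pvALoop f n acc = acc ++ pvALoop f n "" := by
  induction f with
  | zero => intro n acc; simp [pvALoop]
  | succ f ih =>
    intro n acc
    by_cases h : n > 0
    · simp only [pvALoop, if_pos h]
      rw [ih (n - pvLargestValue n) (acc ++ pvLetterFor (pvLargestValue n)),
          ih (n - pvLargestValue n) ("" ++ pvLetterFor (pvLargestValue n))]
      rw [String.empty_append, String.append_assoc]
    · simp [pvALoop, h]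

-- any sufficient fuel gives the same result for A's loop
theorem pv_aLoop_fuel (f : Nat) : ∀ (g : Nat) (n : Int), n.toNat ≤ f → n.toNat ≤ g →
    ∀ acc, pvALoop f n acc = pvALoop g n acc := by
  induction f with
  | zero =>
    intro g n hf _ acc
    have hn : ¬ n > 0 := by omega
    cases g <;> simp [pvALoop, hn]
  | succ f ih =>
    intro g n hf hg acc
    match g with
    | 0 =>
      have hn : ¬ n > 0 := by omega
      simp [pvALoop, hn]
    | g + 1 =>
      by_cases h : n > 0
      · simp only [pvALoop, if_pos h]
        have hv : 1 ≤ pvLargestValue n := pv_largest_pos n (by omega)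
        exact ih g (n - pvLargestValue n) (by omega) (by omega) _
      · simp [pvALoop, h]

-- peeling one 900-step off A
theorem pv_peelA (n : Int) (h9 : 900 ≤ n) :
    pvALoop n.toNat n "" = "ץ" ++ pvALoop (n - 900).toNat (n - 900) "" := by
  obtain ⟨k, hk⟩ : ∃ k, n.toNat = k + 1 := ⟨n.toNat - 1, by omega⟩
  rw [hk]
  simp only [pvALoop, if_pos (show n > 0 by omega), pv_largest_900 n h9, pv_letter_900]
  rw [String.empty_append, pv_aLoop_acc]
  rw [pv_aLoop_fuel k (n - 900).toNat (n - 900) (by omega) (by omega)]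

-- accumulated parts come out of B's inner while
theorem pv_bwhile_parts (f : Nat) : ∀ (n v : Int) (l : String) (parts : List String),
    pvBWhile f n v l parts = ((pvBWhile f n v l []).1, parts ++ (pvBWhile f n v l []).2) := by
  induction f with
  | zero => intro n v l parts; simp [pvBWhile]
  | succ f ih =>
    intro n v l parts
    by_cases h : n ≥ v
    · simp only [pvBWhile, if_pos h]
      rw [ih (n - v) v l (parts ++ [l]), ih (n - v) v l ([] ++ [l])]
      simp
    · simp [pvBWhile, h]

-- any sufficient fuel gives the same result for B's inner while (values are ≥ 1)
theorem pv_bwhile_fuel (f : Nat) : ∀ (g : Nat) (n v : Int), 1 ≤ v → n.toNat ≤ f → n.toNat ≤ g →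
    ∀ l parts, pvBWhile f n v l parts = pvBWhile g n v l parts := by
  induction f with
  | zero =>
    intro g n v hv hf _ l parts
    have hn : ¬ n ≥ v := by omega
    cases g <;> simp [pvBWhile, hn]
  | succ f ih =>
    intro g n v hv hf hg l parts
    match g with
    | 0 =>
      have hn : ¬ n ≥ v := by omega
      simp [pvBWhile, hn]
    | g + 1 =>
      by_cases h : n ≥ v
      · simp only [pvBWhile, if_pos h]
        exact ih g (n - v) v hv (by omega) (by omega) _ _
      · simp [pvBWhile, h]

-- accumulated parts come out of B's outer sweep
theorem pv_sweep_parts (rest : List (String × Int)) : ∀ (n : Int) (parts : List String),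
    pvBSweep rest n parts = parts ++ pvBSweep rest n [] := by
  induction rest with
  | nil => intro n parts; simp [pvBSweep]
  | cons p rest ih =>
    intro n parts
    obtain ⟨l, v⟩ := p
    simp only [pvBSweep]
    rw [pv_bwhile_parts n.toNat n v l parts]
    rw [ih ((pvBWhile n.toNat n v l []).1) (parts ++ (pvBWhile n.toNat n v l []).2),
        ih ((pvBWhile n.toNat n v l []).1) ((pvBWhile n.toNat n v l []).2)]
    simp

-- one pass of the head pair's while-loop peels one letter off B's sweep
theorem pv_peel_head (T : List (String × Int)) (l : String) (v n : Int)
    (hv : 1 ≤ v) (h : v ≤ n) :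
    pvBSweep ((l, v) :: T) n [] = l :: pvBSweep ((l, v) :: T) (n - v) [] := by
  obtain ⟨k, hk⟩ : ∃ k, n.toNat = k + 1 := ⟨n.toNat - 1, by omega⟩
  conv_lhs => simp only [pvBSweep]
  conv_rhs => simp only [pvBSweep]
  rw [hk]
  simp only [pvBWhile, if_pos (show n ≥ v from h)]
  rw [pv_bwhile_fuel k (n - v).toNat (n - v) v hv (by omega) (by omega)]
  rw [pv_bwhile_parts (n - v).toNat (n - v) v l ([] ++ [l])]
  rw [pv_sweep_parts T _ (([] ++ [l]) ++ (pvBWhile (n - v).toNat (n - v) v l []).2)]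
  rw [pv_sweep_parts T _ ((pvBWhile (n - v).toNat (n - v) v l []).2)]
  simp

-- peeling one 900-step off B
theorem pv_peelB (n : Int) (h9 : 900 ≤ n) :
    pvBSweep pvPairsDesc n [] = "ץ" :: pvBSweep pvPairsDesc (n - 900) [] := by
  rw [pv_pairs_eq]
  exact pv_peel_head _ "ץ" 900 n (by omega) h9

-- "".join over a cons
theorem pv_join_cons (s : String) (l : List String) :
    PySem.Str.join "" (s :: l) = s ++ PySem.Str.join "" l := by
  simp [PySem.Str.join, PySem.Chars.join, List.intercalate]
  cases l <;> simp [String.ofList_append]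

-- finite check of the two loop bodies for 0 ≤ n ≤ 899
set_option maxRecDepth 1000000 in
set_option maxHeartbeats 8000000 in
theorem pv_agree_small :
    (List.range 900).all
      (fun k => pvALoop (((k : Int))).toNat (((k : Int))) ""
             == PySem.Str.join "" (pvBSweep pvPairsDesc (((k : Int))) [])) = true := by
  decide

-- the two loop bodies agree on 0 ≤ n ≤ 7000
theorem pv_main (K : Nat) : ∀ (n : Int), n.toNat ≤ K → 0 ≤ n → n ≤ 7000 →
    pvALoop n.toNat n "" = PySem.Str.join "" (pvBSweep pvPairsDesc n []) := by
  induction K with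
  | zero =>
    intro n hK h0 _
    have : n = 0 := by omega
    subst this
    decide
  | succ K ih =>
    intro n hK h0 h7
    by_cases h9 : 900 ≤ n
    · rw [pv_peelA n h9, pv_peelB n h9, pv_join_cons,
          ih (n - 900) (by omega) (by omega) (by omega)]
    · have hmem : n.toNat ∈ List.range 900 := by rw [List.mem_range]; omega
      have hb := (List.all_eq_true.mp pv_agree_small) _ hmem
      have hn : n = ((n.toNat : Int)) := (Int.toNat_of_nonneg h0).symm
      simp only [beq_iff_eq] at hb
      rw [hn]
      simpa using hb

-- ===== VERDICT (by name: the statement is the Claim_ definition above) =====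
theorem reduce_number_to_hebrew_word_spec : Claim_equal_reduce_number_to_hebrew_word := by
  intro n _ hpre
  obtain ⟨h1, h2⟩ := hpre
  unfold Spec_reduce_number_to_hebrew_word reduce_number_to_hebrew_word reduce_number_to_hebrew_word_alt
  rw [if_neg (by omega), if_neg (by omega)]
  exact pv_main n.toNat n le_rfl (by omega) (by omega)
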